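-- pv_equiv track=rewrite | github.com/TEAM-528/problem-solving | 정주완/Programmers/Level 4/블록 게임.py | solution
-- ===== SOURCE A (Python) =====
-- def is_not_zero_upper(board,i,j):
--     while(i>0):
--         i-=1
--         if board[i][j]!=0:
--             return False
--     return True
--
-- def find_pos_black_block(board,i,j):
--     block_num = board[i][j]
--
--     pos_b1 = i+1<len(board) and j-2>=0 and board[i+1][j-2]==block_num and is_not_zero_upper(board,i+1,j-2)
--     pos_b2 = i+1<len(board) and j-1>=0 and board[i+1][j-1]==block_num and is_not_zero_upper(board,i+1,j-1)
--     pos_b3 = i+1<len(board) and board[i+1][j]==block_num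
--     pos_b4 = i+1<len(board) and j+1<len(board[0]) and board[i+1][j+1]==block_num and is_not_zero_upper(board,i+1,j+1)
--     pos_b5 = i+1<len(board) and j+2<len(board[0]) and board[i+1][j+2]==block_num and is_not_zero_upper(board,i+1,j+2)
--
--     pos_b6 = i+2<len(board) and j-1>=0 and board[i+2][j-1]==block_num and is_not_zero_upper(board,i+2,j-1)
--     pos_b7 = i+2<len(board) and board[i+2][j]==block_num
--     pos_b8 = i+2<len(board) and j+1<len(board[0]) and board[i+2][j+1]==block_num and is_not_zero_upper(board,i+2,j+1)
--
--     # 없앨 수 있는 블럭이면 블럭을 0으로 비운 후, 1 반환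
--     if (pos_b1 and pos_b2 and pos_b3):
--         board[i][j] = 0
--         board[i+1][j-2] = 0
--         board[i+1][j-1] = 0
--         board[i+1][j] = 0
--         return 1
--     elif (pos_b2 and pos_b3 and pos_b4):
--         board[i][j] = 0
--         board[i+1][j-1] = 0
--         board[i+1][j] = 0
--         board[i+1][j+1] = 0
--         return 1
--     elif (pos_b3 and pos_b4 and pos_b5):
--         board[i][j] = 0
--         board[i+1][j] = 0
--         board[i+1][j+1] = 0
--         board[i+1][j+2] = 0
--         return 1
--     elif (pos_b3 and pos_b6 and pos_b7):
--         board[i][j] = 0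
--         board[i+1][j] = 0
--         board[i+2][j] = 0
--         board[i+2][j-1] = 0
--         return 1
--     elif (pos_b3 and pos_b7 and pos_b8):
--         board[i][j] = 0
--         board[i+1][j] = 0
--         board[i+2][j] = 0
--         board[i+2][j+1] = 0
--         return 1
--     else:
--         return 0
--
-- def solution(board):
--     answer = 0
--     tmp_answer = 1
--
--     # 더이상 없앨 수 있는 블럭이 없을 때까지 반복 (다른 블럭을 없애서 새로 파괴할 수 있는 블럭이 생기기도 함)
--     while tmp_answer > 0:
--         tmp_answer = 0
--         for i in range(len(board)):
--             for j in range(len(board[0])):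
--                 # 해당 블럭이 없앨 수 있는 블럭이면 정답 1증가
--                 if board[i][j]>0:
--                     tmp_answer += find_pos_black_block(board,i,j)
--         answer += tmp_answer
--
--     return answer
-- ===== SOURCE B (Python) =====
-- # B: table-driven shape matching with an exactly-maintained top[] array (topmost
-- # non-zero row per column), replacing A's per-check upward column scans.
-- # Like A, mutates `board` in place; the proved equivalence is about the return value.
--
-- _SHAPES = [
--     [(1, -2, True), (1, -1, True), (1, 0, False)],
--     [(1, -1, True), (1, 0, False), (1, 1, True)],
--     [(1, 0, False), (1, 1, True), (1, 2, True)],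
--     [(1, 0, False), (2, -1, True), (2, 0, False)],
--     [(1, 0, False), (2, 0, False), (2, 1, True)],
-- ]
--
--
-- def _first_nonzero_row(board, n, c):
--     for r in range(n):
--         if board[r][c] != 0:
--             return r
--     return n
--
--
-- def solution(board):
--     n = len(board)
--     m = len(board[0]) if board else 0
--     top = [_first_nonzero_row(board, n, c) for c in range(m)]
--     answer = 0
--     while True:
--         cleared = 0
--         for i in range(n):
--             for j in range(m):
--                 v = board[i][j]
--                 if v <= 0:
--                     continue
--                 for cells in _SHAPES:
--                     ok = True
--                     for dr, dc, chk in cells: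
--                         r, c = i + dr, j + dc
--                         if not (r < n and 0 <= c < m and board[r][c] == v
--                                 and (not chk or top[c] >= r)):
--                             ok = False
--                             break
--                     if ok:
--                         board[i][j] = 0
--                         for dr, dc, _ in cells:
--                             board[i + dr][j + dc] = 0
--                         for _, dc, _ in cells:
--                             top[j + dc] = _first_nonzero_row(board, n, j + dc)
--                         cleared += 1
--                         break
--         answer += cleared
--         if cleared == 0:
--             return answer
-- ===== Notes on version B (the rewrite author's own statement) =====
-- stated objective: alternative
-- what changed: Replaces A's five hard-coded tetromino branches with a data-driven table of shapes and replaces every is_not_zero_upper column walk by an O(1) lookup in an exactly-maintained top[] array (topmost non-zero row per column, recomputed only for columns touched by a clear).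
import Mathlib
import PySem

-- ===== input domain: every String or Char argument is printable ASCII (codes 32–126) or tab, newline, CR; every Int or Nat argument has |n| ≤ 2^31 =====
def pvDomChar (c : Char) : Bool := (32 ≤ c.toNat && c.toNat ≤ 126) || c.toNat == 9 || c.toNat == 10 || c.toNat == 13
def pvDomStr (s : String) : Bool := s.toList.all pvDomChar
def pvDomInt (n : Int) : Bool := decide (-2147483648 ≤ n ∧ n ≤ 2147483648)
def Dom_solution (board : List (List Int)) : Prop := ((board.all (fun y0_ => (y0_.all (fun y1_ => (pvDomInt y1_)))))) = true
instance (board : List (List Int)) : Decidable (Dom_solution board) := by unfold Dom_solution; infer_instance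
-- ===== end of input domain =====

-- B replaces A's per-check upward column scans by a table of the five shapes and an
-- exactly maintained top[] array (topmost non-zero row per column); both Pythons
-- mutate `board` in place, the equivalence proved is about the return value.

-- ===== PORT A =====
-- board[i][j] (indices always guarded in range in A; default never observed inside Pre_)
def get2 (b : List (List Int)) (i j : Nat) : Int := (b.getD i []).getD j 0

-- board[i][j] = v
def set2 (b : List (List Int)) (i j : Nat) (v : Int) : List (List Int) :=
  b.set i ((b.getD i []).set j v)

-- is_not_zero_upper: while i>0: i-=1; if board[i][j]!=0: return False; return True
def iszu (b : List (List Int)) : Nat → Nat → Bool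
  | 0, _ => true
  | i+1, j => if get2 b i j ≠ 0 then false else iszu b i j

-- find_pos_black_block (returns the mutated board and the 0/1 count)
def findPos (b : List (List Int)) (i j : Nat) : List (List Int) × Int :=
  let n := b.length
  let m := (b.getD 0 []).length
  let num := get2 b i j
  let p1 := decide (i+1 < n) && decide (2 ≤ j) && (get2 b (i+1) (j-2) == num) && iszu b (i+1) (j-2)
  let p2 := decide (i+1 < n) && decide (1 ≤ j) && (get2 b (i+1) (j-1) == num) && iszu b (i+1) (j-1)
  let p3 := decide (i+1 < n) && (get2 b (i+1) j == num)
  let p4 := decide (i+1 < n) && decide (j+1 < m) && (get2 b (i+1) (j+1) == num) && iszu b (i+1) (j+1)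
  let p5 := decide (i+1 < n) && decide (j+2 < m) && (get2 b (i+1) (j+2) == num) && iszu b (i+1) (j+2)
  let p6 := decide (i+2 < n) && decide (1 ≤ j) && (get2 b (i+2) (j-1) == num) && iszu b (i+2) (j-1)
  let p7 := decide (i+2 < n) && (get2 b (i+2) j == num)
  let p8 := decide (i+2 < n) && decide (j+1 < m) && (get2 b (i+2) (j+1) == num) && iszu b (i+2) (j+1)
  if p1 && p2 && p3 then
    (set2 (set2 (set2 (set2 b i j 0) (i+1) (j-2) 0) (i+1) (j-1) 0) (i+1) j 0, 1)
  else if p2 && p3 && p4 then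
    (set2 (set2 (set2 (set2 b i j 0) (i+1) (j-1) 0) (i+1) j 0) (i+1) (j+1) 0, 1)
  else if p3 && p4 && p5 then
    (set2 (set2 (set2 (set2 b i j 0) (i+1) j 0) (i+1) (j+1) 0) (i+1) (j+2) 0, 1)
  else if p3 && p6 && p7 then
    (set2 (set2 (set2 (set2 b i j 0) (i+1) j 0) (i+2) j 0) (i+2) (j-1) 0, 1)
  else if p3 && p7 && p8 then
    (set2 (set2 (set2 (set2 b i j 0) (i+1) j 0) (i+2) j 0) (i+2) (j+1) 0, 1)
  else (b, 0)

-- one inner-loop body of A's double scan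
def stepA (st : List (List Int) × Int) (i j : Nat) : List (List Int) × Int :=
  if get2 st.1 i j > 0 then
    let r := findPos st.1 i j
    (r.1, st.2 + r.2)
  else st

-- the double for-loop of one while-iteration
def scanA (b : List (List Int)) : List (List Int) × Int :=
  (List.range b.length).foldl
    (fun st i => (List.range ((st.1.getD 0 []).length)).foldl (fun st' j => stepA st' i j) st)
    (b, 0)

-- the while loop; fuel n*m+1 is enough, each productive scan zeroes a positive cell
def loopA : Nat → List (List Int) → Int → Int
  | 0, _, acc => acc
  | f+1, b, acc =>
    let r := scanA b
    if r.2 > 0 then loopA f r.1 (acc + r.2) else acc + r.2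

def solution (board : List (List Int)) : Int :=
  loopA (board.length * (board.getD 0 []).length + 1) board 0

-- ===== PORT B =====
-- _SHAPES: (row offset, column offset, needs upper-empty check)
def shapesB : List (List (Nat × Int × Bool)) :=
  [ [(1, -2, true), (1, -1, true), (1, 0, false)],
    [(1, -1, true), (1, 0, false), (1, 1, true)],
    [(1, 0, false), (1, 1, true), (1, 2, true)],
    [(1, 0, false), (2, -1, true), (2, 0, false)],
    [(1, 0, false), (2, 0, false), (2, 1, true)] ]

-- _first_nonzero_row, scanning rows r, r+1, … with fuel
def fnzAux (b : List (List Int)) (c : Nat) : Nat → Nat → Nat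
  | 0, r => r
  | f+1, r => if get2 b r c ≠ 0 then r else fnzAux b c f (r+1)

def fnz (b : List (List Int)) (n c : Nat) : Nat := fnzAux b c n 0

-- one conjunct of the shape test
def cellOk (b : List (List Int)) (top : List Nat) (n m i j : Nat) (v : Int)
    (cell : Nat × Int × Bool) : Bool :=
  let r := i + cell.1
  let c := (j : Int) + cell.2.1
  decide (r < n) && decide (0 ≤ c) && decide (c < (m : Int)) &&
    (get2 b r c.toNat == v) && (!cell.2.2 || decide (r ≤ top.getD c.toNat 0))

-- zero the matched cells (origin first, then the list order)
def clearCells (b : List (List Int)) (i j : Nat) (cells : List (Nat × Int × Bool)) :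
    List (List Int) :=
  cells.foldl (fun bb cell => set2 bb (i + cell.1) ((j : Int) + cell.2.1).toNat 0)
    (set2 b i j 0)

-- recompute top[] for the touched columns from the already-cleared board
def updTops (b : List (List Int)) (top : List Nat) (n j : Nat)
    (cells : List (Nat × Int × Bool)) : List Nat :=
  cells.foldl (fun t cell =>
    t.set ((j : Int) + cell.2.1).toNat (fnz b n ((j : Int) + cell.2.1).toNat)) top

-- one inner-loop body of B's scan
def stepB (n m : Nat) (st : List (List Int) × List Nat × Int) (i j : Nat) :
    List (List Int) × List Nat × Int :=
  let v := get2 st.1 i j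
  if v ≤ 0 then st
  else
    match shapesB.find? (fun cells => cells.all (cellOk st.1 st.2.1 n m i j v)) with
    | none => st
    | some cells =>
      let b' := clearCells st.1 i j cells
      (b', updTops b' st.2.1 n j cells, st.2.2 + 1)

def scanB (n m : Nat) (b : List (List Int)) (top : List Nat) :
    List (List Int) × List Nat × Int :=
  (List.range n).foldl
    (fun st i => (List.range m).foldl (fun st' j => stepB n m st' i j) st)
    (b, top, 0)

def loopB (n m : Nat) : Nat → List (List Int) → List Nat → Int → Int
  | 0, _, _, acc => acc
  | f+1, b, top, acc =>
    let r := scanB n m b top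
    if r.2.2 > 0 then loopB n m f r.1 r.2.1 (acc + r.2.2) else acc + r.2.2

def solution_alt (board : List (List Int)) : Int :=
  let n := board.length
  let m := (board.getD 0 []).length
  loopB n m (n * m + 1) board ((List.range m).map (fun c => fnz board n c)) 0

-- ===== PRECONDITION & SPEC =====
-- A raises IndexError on any board with a row shorter than row 0 (that cell is
-- read on the very first scan); B raises there too.
def Pre_solution (board : List (List Int)) : Prop :=
  (board.all (fun row => decide ((board.headD []).length ≤ row.length))) = true
instance (board : List (List Int)) : Decidable (Pre_solution board) := by
  unfold Pre_solution; infer_instance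

def pvWitness_solution : List (List Int) := [[1, 1], [1, 1]]

def Spec_solution (board : List (List Int)) (out : Int) : Prop := out = solution_alt board
instance (board : List (List Int)) (out : Int) : Decidable (Spec_solution board out) := by
  unfold Spec_solution; infer_instance

-- ===== CLAIM (what is proved, stated in full; the proofs are below) =====
def Claim_equal_solution : Prop :=
  ∀ (board : List (List Int)), Dom_solution board → Pre_solution board →
    Spec_solution board (solution board)

-- ===== LEMMAS AND PROOFS =====

def topsOf (b : List (List Int)) (n m : Nat) : List Nat :=
  (List.range m).map (fun c => fnz b n c)


theorem length_set2 (b : List (List Int)) (i j : Nat) (v : Int) :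
    (set2 b i j v).length = b.length := by simp [set2]

theorem getD0_set2_len (b : List (List Int)) (i j : Nat) (v : Int) :
    ((set2 b i j v).getD 0 []).length = ((b.getD 0 []).length) := by
  simp only [set2, List.getD_eq_getElem?_getD, List.getElem?_set]
  by_cases h : i = 0
  · subst h
    by_cases h0 : 0 < b.length
    · simp [h0, List.getElem?_eq_getElem h0, List.getD_eq_getElem?_getD]
    · simp [h0]
  · simp [h]

theorem get2_set2_ne (b : List (List Int)) (i j r c : Nat) (v : Int)
    (h : r ≠ i ∨ c ≠ j) : get2 (set2 b i j v) r c = get2 b r c := by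
  rcases h with h | h
  · simp only [get2, set2, List.getD_eq_getElem?_getD, List.getElem?_set]
    rw [if_neg (fun hh => h hh.symm)]
  · simp only [get2, set2, List.getD_eq_getElem?_getD, List.getElem?_set]
    by_cases hr : i = r
    · subst hr
      by_cases hb : i < b.length
      · rw [if_pos rfl, if_pos hb]
        simp only [Option.getD_some, List.getD_eq_getElem?_getD,
          List.getElem?_set]
        rw [if_neg (fun hh => h hh.symm)]
        try rw [List.getElem?_eq_getElem hb]
        try rfl
      · rw [if_pos rfl, if_neg hb]
        simp [List.getElem?_eq_none (by omega : b.length ≤ i)]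
    · rw [if_neg hr]

theorem fnzAux_congr (b b' : List (List Int)) (c : Nat)
    (h : ∀ r, get2 b' r c = get2 b r c) :
    ∀ (f s : Nat), fnzAux b' c f s = fnzAux b c f s := by
  intro f
  induction f with
  | zero => intro s; rfl
  | succ f ih => intro s; simp only [fnzAux, h]; split <;> simp [ih]

theorem iszu_iff (b : List (List Int)) (c : Nat) :
    ∀ i, iszu b i c = true ↔ ∀ s < i, get2 b s c = 0 := by
  intro i
  induction i with
  | zero => simp [iszu]
  | succ i ih =>
    simp only [iszu]
    by_cases hz : get2 b i c = 0
    · rw [if_neg (by simp [hz])]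
      rw [ih]
      constructor
      · intro h s hs
        rcases Nat.lt_succ_iff_lt_or_eq.mp hs with h' | h'
        · exact h s h'
        · subst h'; exact hz
      · intro h s hs; exact h s (Nat.lt_succ_of_lt hs)
    · rw [if_pos hz]
      constructor
      · intro h; exact absurd h (by simp)
      · intro h; exact absurd (h i (Nat.lt_succ_self i)) hz

theorem fnzAux_all_zero (b : List (List Int)) (c : Nat) :
    ∀ (f s t : Nat), s ≤ t → t < fnzAux b c f s → get2 b t c = 0 := by
  intro f
  induction f with
  | zero => intro s t h1 h2; simp [fnzAux] at h2; omega
  | succ f ih =>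
    intro s t h1 h2
    simp only [fnzAux] at h2
    split at h2
    · omega
    · rename_i hz
      rw [not_not] at hz
      rcases Nat.eq_or_lt_of_le h1 with h' | h'
      · subst h'; exact hz
      · exact ih (s+1) t h' h2

theorem fnzAux_nonzero (b : List (List Int)) (c : Nat) :
    ∀ (f s : Nat), fnzAux b c f s < s + f → get2 b (fnzAux b c f s) c ≠ 0 := by
  intro f
  induction f with
  | zero => intro s h; simp [fnzAux] at h
  | succ f ih =>
    intro s h
    simp only [fnzAux] at h ⊢
    by_cases hz : get2 b s c ≠ 0
    · rw [if_pos hz]; exact hz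
    · rw [if_neg hz] at h ⊢
      exact ih (s+1) (by omega)

theorem iszu_eq_fnz (b : List (List Int)) (n c r : Nat) (hr : r ≤ n) :
    iszu b r c = decide (r ≤ fnz b n c) := by
  by_cases h : r ≤ fnz b n c
  · simp only [h, decide_true]
    unfold fnz at h
    exact (iszu_iff b c r).mpr
      (fun s hs => fnzAux_all_zero b c n 0 s (Nat.zero_le s) (by omega))
  · simp only [h, decide_false]
    rw [not_le] at h
    have hn : fnzAux b c n 0 < 0 + n := by unfold fnz at h; omega
    have hnz : get2 b (fnz b n c) c ≠ 0 := fnzAux_nonzero b c n 0 hn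
    by_contra hi
    rw [Bool.not_eq_false] at hi
    exact hnz ((iszu_iff b c r).mp hi (fnz b n c) h)

theorem get2_set2_col (b : List (List Int)) (i j r c : Nat) (v : Int) (h : c ≠ j) :
    get2 (set2 b i j v) r c = get2 b r c := get2_set2_ne b i j r c v (Or.inr h)

theorem getD_tops (b : List (List Int)) (n m c : Nat) (hc : c < m) :
    (topsOf b n m).getD c 0 = fnz b n c := by
  rw [topsOf, List.getD_eq_getElem?_getD, List.getElem?_map, List.getElem?_range hc]
  rfl

theorem tops_update3 (b B1 : List (List Int)) (n m c1 c2 c3 : Nat)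
    (h1 : c1 < m) (h2 : c2 < m) (h3 : c3 < m)
    (hcol : ∀ c, c ≠ c1 → c ≠ c2 → c ≠ c3 → ∀ r, get2 B1 r c = get2 b r c) :
    (((topsOf b n m).set c1 (fnz B1 n c1)).set c2 (fnz B1 n c2)).set c3 (fnz B1 n c3)
      = topsOf B1 n m := by
  apply List.ext_getElem
  · simp [topsOf]
  · intro k hk1 hk2
    simp only [topsOf, List.length_set, List.length_map, List.length_range] at hk1
    simp only [topsOf, List.getElem_set, List.getElem_map, List.getElem_range]
    by_cases e3 : c3 = k
    · subst e3; rw [if_pos rfl]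
    · rw [if_neg e3]
      by_cases e2 : c2 = k
      · subst e2; rw [if_pos rfl]
      · rw [if_neg e2]
        by_cases e1 : c1 = k
        · subst e1; rw [if_pos rfl]
        · rw [if_neg e1]
          exact (fnzAux_congr b B1 k
            (hcol k (fun h => e1 h.symm) (fun h => e2 h.symm) (fun h => e3 h.symm)) n 0).symm

theorem find5 {α : Type} (P : α → Bool) (a1 a2 a3 a4 a5 : α) :
    [a1, a2, a3, a4, a5].find? P =
      if P a1 then some a1 else if P a2 then some a2 else if P a3 then some a3
      else if P a4 then some a4 else if P a5 then some a5 else none := by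
  cases h1 : P a1 <;> cases h2 : P a2 <;> cases h3 : P a3 <;> cases h4 : P a4 <;>
    cases h5 : P a5 <;> simp [List.find?, h1, h2, h3, h4, h5]

-- the eight cell tests of B versus the eight pos_b booleans of A
theorem cell_1m2 (b : List (List Int)) (top : List Nat) (n m i j : Nat) (v : Int)
    (htop : top = topsOf b n m) (hj : j < m) :
    cellOk b top n m i j v (1, -2, true)
      = (decide (i+1 < n) && decide (2 ≤ j) && (get2 b (i+1) (j-2) == v)
          && iszu b (i+1) (j-2)) := by
  have hc : ((j:Int) + (-2 : Int)).toNat = j - 2 := by omega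
  have hlt : decide ((j:Int) + (-2:Int) < (m:Int)) = true := by
    rw [decide_eq_true_eq]; omega
  have h0 : decide ((0:Int) ≤ (j:Int) + (-2:Int)) = decide (2 ≤ j) := by
    rw [decide_eq_decide]; omega
  by_cases hin : i + 1 < n
  · have hle : i + 1 ≤ n := by omega
    simp only [cellOk, hc, hlt, h0, htop, getD_tops b n m (j-2) (by omega),
      Bool.not_true, Bool.false_or, Bool.and_true,
      iszu_eq_fnz b n (j-2) (i+1) hle]
  · simp [cellOk, hin]

theorem cell_1m1 (b : List (List Int)) (top : List Nat) (n m i j : Nat) (v : Int)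
    (htop : top = topsOf b n m) (hj : j < m) :
    cellOk b top n m i j v (1, -1, true)
      = (decide (i+1 < n) && decide (1 ≤ j) && (get2 b (i+1) (j-1) == v)
          && iszu b (i+1) (j-1)) := by
  have hc : ((j:Int) + (-1 : Int)).toNat = j - 1 := by omega
  have hlt : decide ((j:Int) + (-1:Int) < (m:Int)) = true := by
    rw [decide_eq_true_eq]; omega
  have h0 : decide ((0:Int) ≤ (j:Int) + (-1:Int)) = decide (1 ≤ j) := by
    rw [decide_eq_decide]; omega
  by_cases hin : i + 1 < n
  · have hle : i + 1 ≤ n := by omega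
    simp only [cellOk, hc, hlt, h0, htop, getD_tops b n m (j-1) (by omega),
      Bool.not_true, Bool.false_or, Bool.and_true,
      iszu_eq_fnz b n (j-1) (i+1) hle]
  · simp [cellOk, hin]

theorem cell_10 (b : List (List Int)) (top : List Nat) (n m i j : Nat) (v : Int)
    (hj : j < m) :
    cellOk b top n m i j v (1, 0, false)
      = (decide (i+1 < n) && (get2 b (i+1) j == v)) := by
  have hc : ((j:Int) + (0 : Int)).toNat = j := by omega
  have hlt : decide ((j:Int) + (0:Int) < (m:Int)) = true := by
    rw [decide_eq_true_eq]; omega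
  have h0 : decide ((0:Int) ≤ (j:Int) + (0:Int)) = true := by
    rw [decide_eq_true_eq]; omega
  simp only [cellOk, hc, hlt, h0, Bool.not_false, Bool.true_or, Bool.and_true]

theorem cell_20 (b : List (List Int)) (top : List Nat) (n m i j : Nat) (v : Int)
    (hj : j < m) :
    cellOk b top n m i j v (2, 0, false)
      = (decide (i+2 < n) && (get2 b (i+2) j == v)) := by
  have hc : ((j:Int) + (0 : Int)).toNat = j := by omega
  have hlt : decide ((j:Int) + (0:Int) < (m:Int)) = true := by
    rw [decide_eq_true_eq]; omega
  have h0 : decide ((0:Int) ≤ (j:Int) + (0:Int)) = true := by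
    rw [decide_eq_true_eq]; omega
  simp only [cellOk, hc, hlt, h0, Bool.not_false, Bool.true_or, Bool.and_true]

theorem cell_1p1 (b : List (List Int)) (top : List Nat) (n m i j : Nat) (v : Int)
    (htop : top = topsOf b n m) (hj : j < m) :
    cellOk b top n m i j v (1, 1, true)
      = (decide (i+1 < n) && decide (j+1 < m) && (get2 b (i+1) (j+1) == v)
          && iszu b (i+1) (j+1)) := by
  have hc : ((j:Int) + (1 : Int)).toNat = j + 1 := by omega
  have h0 : decide ((0:Int) ≤ (j:Int) + (1:Int)) = true := by
    rw [decide_eq_true_eq]; omega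
  have hlt : decide ((j:Int) + (1:Int) < (m:Int)) = decide (j+1 < m) := by
    rw [decide_eq_decide]; omega
  by_cases hjm : j + 1 < m
  · by_cases hin : i + 1 < n
    · have hle : i + 1 ≤ n := by omega
      simp only [cellOk, hc, hlt, h0, htop, getD_tops b n m (j+1) hjm,
        Bool.not_true, Bool.false_or, Bool.true_and, Bool.and_true,
        iszu_eq_fnz b n (j+1) (i+1) hle]
    · simp [cellOk, hin]
  · simp [cellOk, hc, hlt, h0, hjm]

theorem cell_1p2 (b : List (List Int)) (top : List Nat) (n m i j : Nat) (v : Int)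
    (htop : top = topsOf b n m) (hj : j < m) :
    cellOk b top n m i j v (1, 2, true)
      = (decide (i+1 < n) && decide (j+2 < m) && (get2 b (i+1) (j+2) == v)
          && iszu b (i+1) (j+2)) := by
  have hc : ((j:Int) + (2 : Int)).toNat = j + 2 := by omega
  have h0 : decide ((0:Int) ≤ (j:Int) + (2:Int)) = true := by
    rw [decide_eq_true_eq]; omega
  have hlt : decide ((j:Int) + (2:Int) < (m:Int)) = decide (j+2 < m) := by
    rw [decide_eq_decide]; omega
  by_cases hjm : j + 2 < m
  · by_cases hin : i + 1 < n
    · have hle : i + 1 ≤ n := by omega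
      simp only [cellOk, hc, hlt, h0, htop, getD_tops b n m (j+2) hjm,
        Bool.not_true, Bool.false_or, Bool.true_and, Bool.and_true,
        iszu_eq_fnz b n (j+2) (i+1) hle]
    · simp [cellOk, hin]
  · simp [cellOk, hc, hlt, h0, hjm]

theorem cell_2m1 (b : List (List Int)) (top : List Nat) (n m i j : Nat) (v : Int)
    (htop : top = topsOf b n m) (hj : j < m) :
    cellOk b top n m i j v (2, -1, true)
      = (decide (i+2 < n) && decide (1 ≤ j) && (get2 b (i+2) (j-1) == v)
          && iszu b (i+2) (j-1)) := by
  have hc : ((j:Int) + (-1 : Int)).toNat = j - 1 := by omega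
  have hlt : decide ((j:Int) + (-1:Int) < (m:Int)) = true := by
    rw [decide_eq_true_eq]; omega
  have h0 : decide ((0:Int) ≤ (j:Int) + (-1:Int)) = decide (1 ≤ j) := by
    rw [decide_eq_decide]; omega
  by_cases hin : i + 2 < n
  · have hle : i + 2 ≤ n := by omega
    simp only [cellOk, hc, hlt, h0, htop, getD_tops b n m (j-1) (by omega),
      Bool.not_true, Bool.false_or, Bool.and_true,
      iszu_eq_fnz b n (j-1) (i+2) hle]
  · simp [cellOk, hin]

theorem cell_2p1 (b : List (List Int)) (top : List Nat) (n m i j : Nat) (v : Int)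
    (htop : top = topsOf b n m) (hj : j < m) :
    cellOk b top n m i j v (2, 1, true)
      = (decide (i+2 < n) && decide (j+1 < m) && (get2 b (i+2) (j+1) == v)
          && iszu b (i+2) (j+1)) := by
  have hc : ((j:Int) + (1 : Int)).toNat = j + 1 := by omega
  have h0 : decide ((0:Int) ≤ (j:Int) + (1:Int)) = true := by
    rw [decide_eq_true_eq]; omega
  have hlt : decide ((j:Int) + (1:Int) < (m:Int)) = decide (j+1 < m) := by
    rw [decide_eq_decide]; omega
  by_cases hjm : j + 1 < m
  · by_cases hin : i + 2 < n
    · have hle : i + 2 ≤ n := by omega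
      simp only [cellOk, hc, hlt, h0, htop, getD_tops b n m (j+1) hjm,
        Bool.not_true, Bool.false_or, Bool.true_and, Bool.and_true,
        iszu_eq_fnz b n (j+1) (i+2) hle]
    · simp [cellOk, hin]
  · simp [cellOk, hc, hlt, h0, hjm]

-- tops after each of the five clears
theorem tops_b1 (b : List (List Int)) (n m i j : Nat) (hj : j < m) :
    (((topsOf b n m).set (j-2)
        (fnz (set2 (set2 (set2 (set2 b i j 0) (i+1) (j-2) 0) (i+1) (j-1) 0) (i+1) j 0) n (j-2))).set (j-1)
        (fnz (set2 (set2 (set2 (set2 b i j 0) (i+1) (j-2) 0) (i+1) (j-1) 0) (i+1) j 0) n (j-1))).set j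
        (fnz (set2 (set2 (set2 (set2 b i j 0) (i+1) (j-2) 0) (i+1) (j-1) 0) (i+1) j 0) n j)
      = topsOf (set2 (set2 (set2 (set2 b i j 0) (i+1) (j-2) 0) (i+1) (j-1) 0) (i+1) j 0) n m := by
  apply tops_update3 b _ n m (j-2) (j-1) j (by omega) (by omega) hj
  intro c h1 h2 h3 r
  rw [get2_set2_col _ _ _ _ _ _ h3, get2_set2_col _ _ _ _ _ _ h2,
    get2_set2_col _ _ _ _ _ _ h1, get2_set2_col _ _ _ _ _ _ h3]

theorem tops_b2 (b : List (List Int)) (n m i j : Nat) (hj : j < m) (hj1 : j + 1 < m) :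
    (((topsOf b n m).set (j-1)
        (fnz (set2 (set2 (set2 (set2 b i j 0) (i+1) (j-1) 0) (i+1) j 0) (i+1) (j+1) 0) n (j-1))).set j
        (fnz (set2 (set2 (set2 (set2 b i j 0) (i+1) (j-1) 0) (i+1) j 0) (i+1) (j+1) 0) n j)).set (j+1)
        (fnz (set2 (set2 (set2 (set2 b i j 0) (i+1) (j-1) 0) (i+1) j 0) (i+1) (j+1) 0) n (j+1))
      = topsOf (set2 (set2 (set2 (set2 b i j 0) (i+1) (j-1) 0) (i+1) j 0) (i+1) (j+1) 0) n m := by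
  apply tops_update3 b _ n m (j-1) j (j+1) (by omega) hj hj1
  intro c h1 h2 h3 r
  rw [get2_set2_col _ _ _ _ _ _ h3, get2_set2_col _ _ _ _ _ _ h2,
    get2_set2_col _ _ _ _ _ _ h1, get2_set2_col _ _ _ _ _ _ h2]

theorem tops_b3 (b : List (List Int)) (n m i j : Nat) (hj : j < m) (hj2 : j + 2 < m) :
    (((topsOf b n m).set j
        (fnz (set2 (set2 (set2 (set2 b i j 0) (i+1) j 0) (i+1) (j+1) 0) (i+1) (j+2) 0) n j)).set (j+1)
        (fnz (set2 (set2 (set2 (set2 b i j 0) (i+1) j 0) (i+1) (j+1) 0) (i+1) (j+2) 0) n (j+1))).set (j+2)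
        (fnz (set2 (set2 (set2 (set2 b i j 0) (i+1) j 0) (i+1) (j+1) 0) (i+1) (j+2) 0) n (j+2))
      = topsOf (set2 (set2 (set2 (set2 b i j 0) (i+1) j 0) (i+1) (j+1) 0) (i+1) (j+2) 0) n m := by
  apply tops_update3 b _ n m j (j+1) (j+2) hj (by omega) hj2
  intro c h1 h2 h3 r
  rw [get2_set2_col _ _ _ _ _ _ h3, get2_set2_col _ _ _ _ _ _ h2,
    get2_set2_col _ _ _ _ _ _ h1, get2_set2_col _ _ _ _ _ _ h1]

theorem set2_comm (b : List (List Int)) (r c1 c2 : Nat) (v v' : Int) (h : c1 ≠ c2) :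
    set2 (set2 b r c1 v) r c2 v' = set2 (set2 b r c2 v') r c1 v := by
  unfold set2
  by_cases hr : r < b.length
  · have e1 : ∀ (R : List Int), (b.set r R).getD r [] = R := fun R => by
      rw [List.getD_eq_getElem?_getD, List.getElem?_set_eq_of_lt _ (by simpa using hr)]
      rfl
    rw [List.set_set, List.set_set, e1, e1, List.set_comm _ _ h]
  · have hget : ∀ (l : List (List Int)), l.length = b.length → l.getD r [] = [] := by
      intro l hl
      rw [List.getD_eq_getElem?_getD, List.getElem?_eq_none (by omega), Option.getD_none]
    have hb : b.getD r [] = [] := hget b rfl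
    rw [List.set_set, List.set_set, hb]
    rw [hget (b.set r ([].set c1 v)) (by simp), hget (b.set r ([].set c2 v')) (by simp)]
    rfl

theorem tops_b4 (b : List (List Int)) (n m i j : Nat) (hj : j < m) :
    (((topsOf b n m).set j
        (fnz (set2 (set2 (set2 (set2 b i j 0) (i+1) j 0) (i+2) j 0) (i+2) (j-1) 0) n j)).set (j-1)
        (fnz (set2 (set2 (set2 (set2 b i j 0) (i+1) j 0) (i+2) j 0) (i+2) (j-1) 0) n (j-1))).set j
        (fnz (set2 (set2 (set2 (set2 b i j 0) (i+1) j 0) (i+2) j 0) (i+2) (j-1) 0) n j)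
      = topsOf (set2 (set2 (set2 (set2 b i j 0) (i+1) j 0) (i+2) j 0) (i+2) (j-1) 0) n m := by
  apply tops_update3 b _ n m j (j-1) j hj (by omega) hj
  intro c h1 h2 h3 r
  rw [get2_set2_col _ _ _ _ _ _ h2, get2_set2_col _ _ _ _ _ _ h1,
    get2_set2_col _ _ _ _ _ _ h1, get2_set2_col _ _ _ _ _ _ h1]

theorem tops_b5 (b : List (List Int)) (n m i j : Nat) (hj : j < m) (hj1 : j + 1 < m) :
    (((topsOf b n m).set j
        (fnz (set2 (set2 (set2 (set2 b i j 0) (i+1) j 0) (i+2) j 0) (i+2) (j+1) 0) n j)).set j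
        (fnz (set2 (set2 (set2 (set2 b i j 0) (i+1) j 0) (i+2) j 0) (i+2) (j+1) 0) n j)).set (j+1)
        (fnz (set2 (set2 (set2 (set2 b i j 0) (i+1) j 0) (i+2) j 0) (i+2) (j+1) 0) n (j+1))
      = topsOf (set2 (set2 (set2 (set2 b i j 0) (i+1) j 0) (i+2) j 0) (i+2) (j+1) 0) n m := by
  apply tops_update3 b _ n m j j (j+1) hj hj hj1
  intro c h1 h2 h3 r
  rw [get2_set2_col _ _ _ _ _ _ h3, get2_set2_col _ _ _ _ _ _ h1,
    get2_set2_col _ _ _ _ _ _ h1, get2_set2_col _ _ _ _ _ _ h1]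

theorem getD0_set2_len' (b : List (List Int)) (i j : Nat) (v : Int) :
    ((set2 b i j v)[0]?.getD []).length = ((b[0]?.getD []).length) := by
  simpa [List.getD_eq_getElem?_getD] using getD0_set2_len b i j v

theorem stepA_len (b : List (List Int)) (t : Int) (i j : Nat) :
    (stepA (b, t) i j).1.length = b.length ∧
      ((stepA (b, t) i j).1.getD 0 []).length = (b.getD 0 []).length := by
  simp only [stepA, findPos]
  split_ifs <;> simp [length_set2, getD0_set2_len, getD0_set2_len']

set_option maxHeartbeats 1600000 in
theorem step_eq (n m : Nat) (b : List (List Int)) (t : Int) (i j : Nat)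
    (hn : b.length = n) (hm : (b.getD 0 []).length = m) (hj : j < m) :
    stepB n m (b, topsOf b n m, t) i j
      = ((stepA (b, t) i j).1, topsOf (stepA (b, t) i j).1 n m, (stepA (b, t) i j).2) := by
  by_cases hv : get2 b i j > 0
  · have hneg : ¬ get2 b i j ≤ 0 := by omega
    have hm2 : ((j:Int) + (-2 : Int)).toNat = j - 2 := by omega
    have hm1 : ((j:Int) + (-1 : Int)).toNat = j - 1 := by omega
    have hp0 : ((j:Int) + (0 : Int)).toNat = j := by omega
    have hp1 : ((j:Int) + (1 : Int)).toNat = j + 1 := by omega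
    have hp2 : ((j:Int) + (2 : Int)).toNat = j + 2 := by omega
    simp only [stepA, stepB, findPos, shapesB]
    rw [if_neg hneg, if_pos hv, hn, hm, find5]
    simp only [List.all_cons, List.all_nil, Bool.and_true]
    rw [cell_1m2 b (topsOf b n m) n m i j (get2 b i j) rfl hj,
      cell_1m1 b (topsOf b n m) n m i j (get2 b i j) rfl hj,
      cell_10 b (topsOf b n m) n m i j (get2 b i j) hj,
      cell_1p1 b (topsOf b n m) n m i j (get2 b i j) rfl hj,
      cell_1p2 b (topsOf b n m) n m i j (get2 b i j) rfl hj,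
      cell_2m1 b (topsOf b n m) n m i j (get2 b i j) rfl hj,
      cell_20 b (topsOf b n m) n m i j (get2 b i j) hj,
      cell_2p1 b (topsOf b n m) n m i j (get2 b i j) rfl hj]
    simp only [← Bool.and_assoc]
    split_ifs with h1 h2 h3 h4 h5
    · simp only [clearCells, updTops, List.foldl_cons, List.foldl_nil, hm2, hm1, hp0, hp1, hp2]
      rw [tops_b1 b n m i j hj]
    · simp only [Bool.and_eq_true, decide_eq_true_eq] at h2
      simp only [clearCells, updTops, List.foldl_cons, List.foldl_nil, hm2, hm1, hp0, hp1, hp2]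
      rw [tops_b2 b n m i j hj (by tauto)]
    · simp only [Bool.and_eq_true, decide_eq_true_eq] at h3
      simp only [clearCells, updTops, List.foldl_cons, List.foldl_nil, hm2, hm1, hp0, hp1, hp2]
      rw [tops_b3 b n m i j hj (by tauto)]
    · simp only [Bool.and_eq_true, decide_eq_true_eq] at h4
      have hj1 : 1 ≤ j := by tauto
      simp only [clearCells, updTops, List.foldl_cons, List.foldl_nil, hm2, hm1, hp0, hp1, hp2]
      rw [set2_comm _ (i+2) (j-1) j 0 0 (by omega)]
      rw [tops_b4 b n m i j hj]
    · simp only [Bool.and_eq_true, decide_eq_true_eq] at h5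
      simp only [clearCells, updTops, List.foldl_cons, List.foldl_nil, hm2, hm1, hp0, hp1, hp2]
      rw [tops_b5 b n m i j hj (by tauto)]
    · simp
  · have hle : get2 b i j ≤ 0 := by omega
    simp only [stepA, stepB]
    rw [if_pos hle, if_neg hv]

theorem foldJ_eq (n m i : Nat) :
    ∀ (lj : List Nat), (∀ j ∈ lj, j < m) → ∀ (b : List (List Int)) (t : Int),
      b.length = n → (b.getD 0 []).length = m →
      lj.foldl (fun st j => stepB n m st i j) (b, topsOf b n m, t)
        = ((lj.foldl (fun st j => stepA st i j) (b, t)).1,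
           topsOf (lj.foldl (fun st j => stepA st i j) (b, t)).1 n m,
           (lj.foldl (fun st j => stepA st i j) (b, t)).2)
      ∧ (lj.foldl (fun st j => stepA st i j) (b, t)).1.length = n
      ∧ ((lj.foldl (fun st j => stepA st i j) (b, t)).1.getD 0 []).length = m := by
  intro lj
  induction lj with
  | nil => intro _ b t hn hm; exact ⟨rfl, hn, hm⟩
  | cons j lj ih =>
    intro hmem b t hn hm
    have hj : j < m := hmem j (List.mem_cons_self)
    have hstep := step_eq n m b t i j hn hm hj
    have hlen := stepA_len b t i j
    simp only [List.foldl_cons]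
    rw [hstep]
    exact ih (fun x hx => hmem x (List.mem_cons_of_mem _ hx))
      (stepA (b, t) i j).1 (stepA (b, t) i j).2 (by omega) (by omega)

theorem foldI_eq (n m : Nat) :
    ∀ (li : List Nat) (b : List (List Int)) (t : Int),
      b.length = n → (b.getD 0 []).length = m →
      li.foldl (fun st i => (List.range m).foldl (fun st' j => stepB n m st' i j) st)
          (b, topsOf b n m, t)
        = ((li.foldl (fun st i =>
              (List.range ((st.1.getD 0 []).length)).foldl (fun st' j => stepA st' i j) st) (b, t)).1,
           topsOf (li.foldl (fun st i =>
              (List.range ((st.1.getD 0 []).length)).foldl (fun st' j => stepA st' i j) st) (b, t)).1 n m,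
           (li.foldl (fun st i =>
              (List.range ((st.1.getD 0 []).length)).foldl (fun st' j => stepA st' i j) st) (b, t)).2)
      ∧ (li.foldl (fun st i =>
            (List.range ((st.1.getD 0 []).length)).foldl (fun st' j => stepA st' i j) st) (b, t)).1.length = n
      ∧ ((li.foldl (fun st i =>
            (List.range ((st.1.getD 0 []).length)).foldl (fun st' j => stepA st' i j) st) (b, t)).1.getD 0 []).length = m := by
  intro li
  induction li with
  | nil => intro b t hn hm; exact ⟨rfl, hn, hm⟩
  | cons i li ih =>
    intro b t hn hm
    simp only [List.foldl_cons, hm]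
    have hJ := foldJ_eq n m i (List.range m) (fun x hx => List.mem_range.mp hx) b t hn hm
    rw [hJ.1]
    exact ih _ _ hJ.2.1 hJ.2.2

theorem scan_eq (n m : Nat) (b : List (List Int))
    (hn : b.length = n) (hm : (b.getD 0 []).length = m) :
    scanB n m b (topsOf b n m)
      = ((scanA b).1, topsOf (scanA b).1 n m, (scanA b).2)
      ∧ (scanA b).1.length = n ∧ ((scanA b).1.getD 0 []).length = m := by
  have h := foldI_eq n m (List.range n) b 0 hn hm
  unfold scanA scanB
  rw [hn]
  exact h

theorem loop_eq (n m : Nat) :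
    ∀ (f : Nat) (b : List (List Int)) (acc : Int),
      b.length = n → (b.getD 0 []).length = m →
      loopB n m f b (topsOf b n m) acc = loopA f b acc := by
  intro f
  induction f with
  | zero => intro b acc _ _; rfl
  | succ f ih =>
    intro b acc hn hm
    have h := scan_eq n m b hn hm
    simp only [loopB, loopA, h.1]
    by_cases hpos : (scanA b).2 > 0
    · rw [if_pos hpos, if_pos hpos]
      exact ih (scanA b).1 (acc + (scanA b).2) h.2.1 h.2.2
    · rw [if_neg hpos, if_neg hpos]

-- ===== VERDICT (by name: the statement is the Claim_ definition above) =====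
theorem solution_spec : Claim_equal_solution := by
  intro board _ _
  unfold Spec_solution solution solution_alt
  exact (loop_eq board.length ((board.getD 0 []).length)
    (board.length * ((board.getD 0 []).length) + 1) board 0 rfl rfl).symm
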